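-- pv_equiv track=rewrite | github.com/MlvPrasadOfficial/SCALER_DSML_MAR_2022_SOLUTIONS_BY_MLV_PRASAD | Day010 - DSML Intermediate DSA  Arrays -Subarrays/h03.py | solve
-- ===== SOURCE A (Python) =====
-- def solve(A, B):
--     L  = len(A)
--     if B == 0 :
--         a = []
--         for i in range(L) :
--             a.append(i)
--         return a
--     newb = ((2*B)+1)
--     res = 0
--     aa = []
--     for i in range(newb,L+1):
--         pp = A[i-newb:i]
--         count = 0
--         for j in range(len(pp)-1):
--             if pp[j]+ pp[j+1]== 1:
--                 count+=1
--         if count == len(pp)-1 :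
--             aa.append(i-newb +B)
--     return aa
-- ===== SOURCE B (Python) =====
-- def solve(A, B):
--     L = len(A)
--     if B == 0:
--         return list(range(L))
--     w = 2 * B + 1
--     if L < w:  # no window fits
--         return []
--     # prefix[k] = number of indices j < k with A[j] + A[j+1] == 1
--     pref = [0]
--     for j in range(L - 1):
--         pref.append(pref[-1] + (1 if A[j] + A[j + 1] == 1 else 0))
--     return [s + B for s in range(L - w + 1)
--             if pref[s + w - 1] - pref[s] == w - 1]
-- ===== Notes on version B (the rewrite author's own statement) =====
-- stated objective: alternative
-- what changed: Replaces the per-window rescan of all 2B adjacent pairs by a single prefix-sum array of good-adjacency flags, so each window is checked with one range query.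
-- outside the precondition, e.g. on solve([0, 1, 0], -1): A returns [-1], B raises IndexError
import Mathlib
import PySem

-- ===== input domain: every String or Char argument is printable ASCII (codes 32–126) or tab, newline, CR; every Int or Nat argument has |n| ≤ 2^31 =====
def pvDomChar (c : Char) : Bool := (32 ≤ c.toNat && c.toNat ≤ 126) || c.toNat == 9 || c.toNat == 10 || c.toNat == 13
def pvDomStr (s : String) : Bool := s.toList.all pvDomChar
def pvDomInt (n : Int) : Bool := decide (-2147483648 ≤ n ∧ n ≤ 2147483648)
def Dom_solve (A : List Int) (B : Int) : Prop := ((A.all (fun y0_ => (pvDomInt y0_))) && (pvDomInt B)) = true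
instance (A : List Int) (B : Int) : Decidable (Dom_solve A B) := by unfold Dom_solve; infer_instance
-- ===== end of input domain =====

-- B replaces A's per-window rescan of all 2B adjacent pairs by one prefix-sum array of
-- good-adjacency flags queried once per window; objective: alternative algorithm.

-- ===== PORT A =====
def solve (A : List Int) (B : Int) : List Int :=
  let L : Int := A.length
  if B == 0 then
    (PySem.List.pyRange 0 L 1).foldl (fun a i => a ++ [i]) []
  else
    let newb := 2 * B + 1
    (PySem.List.pyRange newb (L + 1) 1).foldl (fun aa i =>
      let pp := PySem.List.slice A (some (i - newb)) (some i)
      let count := (PySem.List.pyRange 0 ((pp.length : Int) - 1) 1).foldl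
        (fun c j =>
          if PySem.List.pyGetD pp j 0 + PySem.List.pyGetD pp (j + 1) 0 == 1 then c + 1 else c)
        (0 : Int)
      if count == (pp.length : Int) - 1 then aa ++ [i - newb + B] else aa) []

-- ===== PORT B =====
def solve_alt (A : List Int) (B : Int) : List Int :=
  let L : Int := A.length
  if B == 0 then
    PySem.List.pyRange 0 L 1
  else
    let w := 2 * B + 1
    if L < w then [] else
    let pref := (PySem.List.pyRange 0 (L - 1) 1).foldl
      (fun p j => p ++ [PySem.List.pyGetD p (-1) 0 +
        (if PySem.List.pyGetD A j 0 + PySem.List.pyGetD A (j + 1) 0 == 1 then (1 : Int) else 0)])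
      [(0 : Int)]
    ((PySem.List.pyRange 0 (L - w + 1) 1).filter
      (fun s => PySem.List.pyGetD pref (s + w - 1) 0 - PySem.List.pyGetD pref s 0 == w - 1)).map
      (fun s => s + B)

-- ===== PRECONDITION & SPEC =====
-- Pre_ restricts to the task's natural domain B ≥ 0 (a window half-width): for negative B,
-- A's range and slice indices go negative and Python's wraparound slicing yields accidental
-- values (e.g. solve([0,1,0], -1) = [-1]), while B's natural algorithm raises there.
def Pre_solve (A : List Int) (B : Int) : Prop := 0 ≤ B
instance (A : List Int) (B : Int) : Decidable (Pre_solve A B) := by unfold Pre_solve; infer_instance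
def pvWitness_solve : List Int × Int := ([0, 1, 0], 1)

def Spec_solve (A : List Int) (B : Int) (out : List Int) : Prop := out = solve_alt A B
instance (A : List Int) (B : Int) (out : List Int) : Decidable (Spec_solve A B out) := by unfold Spec_solve; infer_instance

-- ===== CLAIM (what is proved, stated in full; the proofs are below) =====
def Claim_equal_solve : Prop := ∀ (A : List Int) (B : Int), Dom_solve A B → Pre_solve A B → Spec_solve A B (solve A B)

-- ===== LEMMAS AND PROOFS =====

-- adjacency flag at position j: A[j] + A[j+1] == 1
def goodB (A : List Int) (j : Nat) : Bool :=
  PySem.List.pyGetD A (j : Int) 0 + PySem.List.pyGetD A ((j : Int) + 1) 0 == 1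

-- number of good adjacencies strictly below k (the value pref[k] holds)
def cnt (A : List Int) (k : Nat) : Int := ((List.range k).countP (goodB A) : Int)

lemma cnt_succ (A : List Int) (n : Nat) :
    cnt A (n + 1) = cnt A n + (if goodB A n then (1 : Int) else 0) := by
  unfold cnt
  rw [List.range_succ, List.countP_append]
  by_cases h : goodB A n <;> simp [h]

lemma pref_inv (A : List Int) (n : Nat) :
    (List.range n).foldl
      (fun p j => p ++ [PySem.List.pyGetD p (-1) 0 +
        (if goodB A j then (1 : Int) else 0)]) [0]
      = (List.range (n + 1)).map (cnt A) := by
  induction n with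
  | zero => simp [cnt]
  | succ n ih =>
      rw [List.range_succ, List.foldl_append, ih]
      rw [List.range_succ (n := n + 1), List.map_append]
      have hlast : (List.range (n + 1)).map (cnt A)
          = (List.range n).map (cnt A) ++ [cnt A n] := by
        rw [List.range_succ, List.map_append]; rfl
      simp only [List.foldl_cons, List.foldl_nil, hlast,
        PySem.List.pyGetD_neg_one_append_singleton]
      simp [cnt_succ]

lemma cnt_shift (A : List Int) (k m : Nat) :
    cnt A (k + m) - cnt A k
      = ((List.range m).countP (fun j => goodB A (k + j)) : Int) := by
  unfold cnt
  rw [List.range_add, List.countP_append, List.countP_map]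
  push_cast
  ring_nf
  rfl

lemma window_getD (A : List Int) (k w' m : Nat) (hm : m < w') (hkw : k + w' ≤ A.length) :
    (List.take w' (List.drop k A)).getD m 0 = A.getD (k + m) 0 := by
  have h1 : m < A.length - k := by omega
  simp [List.getD, hm, List.getElem?_drop]

-- ===== core pointwise lemma: A's window test = B's prefix-range test =====
lemma core (A : List Int) (w' k : Nat) (h3 : 3 ≤ w') (hkw : k + w' ≤ A.length) :
    ((0 : Int) + ((List.range (w' - 1)).countP
        (fun (m : Nat) => PySem.List.pyGetD (List.take w' (List.drop k A)) ((m : Nat) : Int) 0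
          + PySem.List.pyGetD (List.take w' (List.drop k A)) (((m : Nat) : Int) + 1) 0 == 1) : Int)
      == ((w' - 1 : Nat) : Int))
    = (cnt A (k + w' - 1) - cnt A k == (w' : Int) - 1) := by
  have hpred : ∀ m ∈ List.range (w' - 1),
      (PySem.List.pyGetD (List.take w' (List.drop k A)) ((m : Nat) : Int) 0
        + PySem.List.pyGetD (List.take w' (List.drop k A)) (((m : Nat) : Int) + 1) 0 == 1)
      = goodB A (k + m) := by
    intro m hm
    rw [List.mem_range] at hm
    have h1 : ((m : Int) + 1) = ((m + 1 : Nat) : Int) := by push_cast; ring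
    rw [h1, PySem.List.pyGetD_natCast, PySem.List.pyGetD_natCast]
    rw [window_getD A k w' m (by omega) hkw, window_getD A k w' (m + 1) (by omega) hkw]
    unfold goodB
    have h2 : ((k + m : Nat) : Int) + 1 = ((k + m + 1 : Nat) : Int) := by push_cast; ring
    rw [h2, PySem.List.pyGetD_natCast, PySem.List.pyGetD_natCast]
    have h3 : k + (m + 1) = k + m + 1 := by omega
    rw [h3]
  rw [List.countP_congr (fun m hm => by rw [hpred m hm])]
  have hsub : k + w' - 1 = k + (w' - 1) := by omega
  rw [hsub, cnt_shift A k (w' - 1)]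
  have hw1 : ((w' - 1 : Nat) : Int) = (w' : Int) - 1 := by omega
  rw [hw1, zero_add]

lemma map_filter_ext (N : Nat) (pA pB : Nat → Bool) (fA fB : Nat → Int)
    (h : ∀ k, k < N → pA k = pB k ∧ fA k = fB k) :
    ((List.range N).filter pA).map fA = ((List.range N).filter pB).map fB := by
  have hf : (List.range N).filter pA = (List.range N).filter pB :=
    List.filter_congr (fun k hk => (h k (List.mem_range.mp hk)).1)
  rw [hf]
  exact List.map_congr_left (fun k hk =>
    (h k (List.mem_range.mp (List.mem_of_mem_filter hk))).2)

-- ===== VERDICT (by name: the statement is the Claim_ definition above) =====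
theorem solve_spec : Claim_equal_solve := by
  intro A B hdom hpre
  unfold Spec_solve
  by_cases hB : B = 0
  · subst hB
    simp only [solve, solve_alt, beq_self_eq_true, if_true]
    rw [PySem.List.foldl_append_singleton_eq_self, List.nil_append]
  · have hB1 : 1 ≤ B := by
      have : 0 ≤ B := hpre
      omega
    have hBne : (B == 0) = false := by simp [hB]
    simp only [solve, solve_alt, hBne, Bool.false_eq_true, if_false]
    -- the window width as a natural number
    have hw' : (2 * B + 1 : Int) = ((2 * B + 1).toNat : Int) := by omega
    by_cases hLw : ((A.length : Int)) < 2 * B + 1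
    · -- no window fits: A's outer range is empty, B returns [] at once
      rw [if_pos hLw, PySem.List.pyRange_one_eq_nil (by omega), List.foldl_nil]
    rw [if_neg hLw]
    -- rewrite B's prefix list as the table of cnt values
    have hpref : List.foldl
        (fun p j => p ++ [PySem.List.pyGetD p (-1) 0 +
          if PySem.List.pyGetD A j 0 + PySem.List.pyGetD A (j + 1) 0 == 1 then (1 : Int) else 0])
        [0] (PySem.List.pyRange 0 ((A.length : Int) - 1))
        = (List.range (((A.length : Int) - 1).toNat + 1)).map (cnt A) := by
      rw [PySem.List.pyRange_zero, List.foldl_map]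
      exact pref_inv A _
    rw [hpref]
    -- both outer loops become maps over List.range
    rw [PySem.List.pyRange_one (2 * B + 1) ((A.length : Int) + 1), List.foldl_map,
        PySem.List.foldl_append_if, List.nil_append,
        PySem.List.pyRange_zero ((A.length : Int) - (2 * B + 1) + 1),
        List.filter_map, List.map_map]
    have hN : ((A.length : Int) + 1 - (2 * B + 1)).toNat
        = ((A.length : Int) - (2 * B + 1) + 1).toNat := by omega
    rw [hN]
    apply map_filter_ext
    intro k hk
    have hkw : k + (2 * B + 1).toNat ≤ A.length := by omega
    constructor
    · -- the window test agrees with the prefix-range test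
      have e1 : (2 * B + 1) + (k : Int) - (2 * B + 1) = ((k : Nat) : Int) := by ring
      have e2 : (2 * B + 1) + (k : Int) = ((k : Nat) : Int) + (((2 * B + 1).toNat : Nat) : Int) := by
        omega
      rw [e1, e2, PySem.List.slice_natCast_add]
      have hlen : (List.take (2 * B + 1).toNat (List.drop k A)).length = (2 * B + 1).toNat := by
        simp [List.length_take]
        omega
      rw [hlen]
      have e3 : ((((2 * B + 1).toNat : Nat) : Int) - 1) = (((2 * B + 1).toNat - 1 : Nat) : Int) := by
        omega
      rw [e3, PySem.List.pyRange_zero_nat, List.foldl_map, PySem.List.foldl_count_if]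
      rw [core A ((2 * B + 1).toNat) k (by omega) hkw]
      -- now rewrite the right-hand side's prefix lookups
      simp only [Function.comp_apply]
      have e4 : (k : Int) + (2 * B + 1) - 1
          = ((k + (2 * B + 1).toNat - 1 : Nat) : Int) := by omega
      rw [e4, PySem.List.pyGetD_natCast, PySem.List.pyGetD_natCast]
      rw [PySem.List.getD_map_range _ _ _ _ (by omega),
          PySem.List.getD_map_range _ _ _ _ (by omega)]
      have e6 : (2 * B + 1 - 1 : Int) = (((2 * B + 1).toNat : Nat) : Int) - 1 := by omega
      rw [e6]
    · -- the emitted centres agree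
      simp only [Function.comp_apply]
      ring
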